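-- pv_equiv track=rewrite | github.com/litiblue/topcoder | hoseop/srm/637/div2/PathGameDiv2.py | calc
-- ===== SOURCE A (Python) =====
-- def calc(board):
-- 	plus_cnt = 0
-- 	minus_cnt = 0
-- 	sharp = -1
-- 	for i in range(len(board[0])):
-- 		if board[0][i]=='.' and board[1][i]=='.':	plus_cnt+=1
-- 		if board[0][i]=='#':
-- 			if sharp==1:	minus_cnt+=1
-- 			sharp = 0
-- 		elif board[1][i]=='#':
-- 			if sharp==0:	minus_cnt+=1
-- 			sharp = 1
-- 	if plus_cnt==0: return 0
-- 	return plus_cnt-minus_cnt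
-- ===== SOURCE B (Python) =====
-- def _solve(cols):
--     # (plus, minus, first obstacle row, last obstacle row) of this block of columns
--     if not cols:
--         return (0, 0, None, None)
--     if len(cols) == 1:
--         a, b = cols[0]
--         p = 1 if a == '.' and b == '.' else 0
--         r = 0 if a == '#' else 1 if b == '#' else None
--         return (p, 0, r, r)
--     mid = len(cols) // 2
--     pL, mL, fL, lL = _solve(cols[:mid])
--     pR, mR, fR, lR = _solve(cols[mid:])
--     cross = 1 if lL is not None and fR is not None and lL != fR else 0
--     return (pL + pR, mL + mR + cross,
--             fL if fL is not None else fR,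
--             lR if lR is not None else lL)
--
-- def calc(board):
--     p, m, _, _ = _solve(list(zip(board[0], board[1])))
--     return p - m if p else 0
-- ===== Notes on version B (the rewrite author's own statement) =====
-- stated objective: alternative
-- what changed: Replaces A's left-to-right state machine (running sharp state) by a divide-and-conquer over the column list: each half is summarized as (plus, minus, first-obstacle-row, last-obstacle-row) and the halves are merged, adding one transition when the halves' boundary obstacle rows differ.
-- outside the precondition, e.g. on calc(['..#', '.#']): A returns 0, B returns 1; on calc(['..', '.']): A raises IndexError, B returns 1
import Mathlib
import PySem

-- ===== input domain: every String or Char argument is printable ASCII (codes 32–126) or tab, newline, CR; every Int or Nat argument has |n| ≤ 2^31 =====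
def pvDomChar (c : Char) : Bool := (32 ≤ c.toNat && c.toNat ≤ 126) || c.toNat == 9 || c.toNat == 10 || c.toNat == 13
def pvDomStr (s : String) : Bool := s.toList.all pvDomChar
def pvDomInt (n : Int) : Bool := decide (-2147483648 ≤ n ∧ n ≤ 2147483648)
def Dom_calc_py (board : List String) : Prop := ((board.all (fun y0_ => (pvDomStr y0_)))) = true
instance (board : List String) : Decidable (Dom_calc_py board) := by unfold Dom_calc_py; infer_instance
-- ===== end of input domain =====

-- B replaces A's left-to-right state machine by a divide-and-conquer over the column list,
-- merging (plus, minus, first/last obstacle row) summaries of the two halves; alternative decomposition.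


-- ===== PORT A =====
-- loop body of A (the two row characters at index i are passed in; branches in source order)
def pvBodyA (c0 c1 : Char) (st : Int × Int × Int) : Int × Int × Int :=
  let plus := if c0 = '.' ∧ c1 = '.' then st.1 + 1 else st.1
  if c0 = '#' then (plus, (if st.2.2 = 1 then st.2.1 + 1 else st.2.1), 0)
  else if c1 = '#' then (plus, (if st.2.2 = 0 then st.2.1 + 1 else st.2.1), 1)
  else (plus, st.2.1, st.2.2)

def calc_py (board : List String) : Int :=
  let r0 := (board.getD 0 "").toList     -- board[0]; Pre_ guarantees the index accesses are in range
  let r1 := (board.getD 1 "").toList     -- board[1]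
  let s := (List.range r0.length).foldl
    (fun st i => pvBodyA (r0.getD i ' ') (r1.getD i ' ') st) (0, 0, -1)
  if s.1 = 0 then 0 else s.1 - s.2.1

-- ===== PORT B =====
-- _solve: divide-and-conquer block summary (plus, minus, first obstacle row, last obstacle row)
def pvSolve : List (Char × Char) → Int × Int × Option Int × Option Int
  | [] => (0, 0, none, none)
  | [(a, b)] =>
      let p : Int := if a = '.' ∧ b = '.' then 1 else 0
      let r : Option Int := if a = '#' then some 0 else if b = '#' then some 1 else none
      (p, 0, r, r)
  | c1 :: c2 :: rest =>
      let cols := c1 :: c2 :: rest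
      let mid := cols.length / 2
      let L := pvSolve (cols.take mid)
      let R := pvSolve (cols.drop mid)
      let cross : Int := match L.2.2.2, R.2.2.1 with
        | some lL, some fR => if lL = fR then 0 else 1
        | _, _ => 0
      (L.1 + R.1, L.2.1 + R.2.1 + cross, L.2.2.1.or R.2.2.1, R.2.2.2.or L.2.2.2)
  termination_by cols => cols.length
  decreasing_by
  · simp [List.length_take]; omega
  · simp; omega

def calc_py_alt (board : List String) : Int :=
  let s := pvSolve (((board.getD 0 "").toList).zip ((board.getD 1 "").toList))
  if s.1 = 0 then 0 else s.1 - s.2.1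

-- ===== PRECONDITION & SPEC =====
-- Pre_ excludes boards with fewer than two rows or with row 1 shorter than row 0: there A
-- generally raises IndexError, and in the few ragged cases where A still returns (every
-- overhanging column of row 0 is '#') the value depends on half-missing columns, a ragged-board
-- corner where B's truncation to the common width is equally defensible.
def Pre_calc_py (board : List String) : Prop :=
  2 ≤ board.length ∧ (board.getD 0 "").length ≤ (board.getD 1 "").length
instance (board : List String) : Decidable (Pre_calc_py board) := by unfold Pre_calc_py; infer_instance
def pvWitness_calc_py : List String := ["#..", ".#."]

def Spec_calc_py (board : List String) (out : Int) : Prop := out = calc_py_alt board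
instance (board : List String) (out : Int) : Decidable (Spec_calc_py board out) := by unfold Spec_calc_py; infer_instance

-- ===== CLAIM (what is proved, stated in full; the proofs are below) =====
def Claim_equal_calc_py : Prop := ∀ (board : List String), Dom_calc_py board → Pre_calc_py board → Spec_calc_py board (calc_py board)

-- ===== LEMMAS AND PROOFS =====

-- number of both-dot columns
def pvDots (z : List (Char × Char)) : Int := (z.filter (fun p => p.1 = '.' ∧ p.2 = '.')).length

-- obstacle-row sequence: 0 if row 0 has '#', else 1 if row 1 has '#'
def pvSeqOf (z : List (Char × Char)) : List Int :=
  z.filterMap (fun p => if p.1 = '#' then some 0 else if p.2 = '#' then some 1 else none)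

-- transition count of a sequence seeded with a previous value s (A's `sharp`)
def pvAdj (s : Int) (l : List Int) : Int :=
  match l with
  | [] => 0
  | x :: xs => (if (x = 0 ∧ s = 1) ∨ (x = 1 ∧ s = 0) then 1 else 0) + pvAdj x xs

-- adjacent-difference count of a sequence (what B's merge computes)
def pvTrans : List Int → Int
  | [] => 0
  | [_] => 0
  | x :: y :: t => (if x = y then 0 else 1) + pvTrans (y :: t)

def pvCross : Option Int → Option Int → Int
  | some x, some y => if x = y then 0 else 1
  | _, _ => 0

-- the index loop over range with getD is a fold over the zipped rows when row 1 is long enough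
theorem pv_range_zip {σ : Type} (body : Char → Char → σ → σ) :
    ∀ (r0 r1 : List Char) (st : σ), r0.length ≤ r1.length →
    (List.range r0.length).foldl (fun st i => body (r0.getD i ' ') (r1.getD i ' ') st) st
      = (r0.zip r1).foldl (fun st p => body p.1 p.2 st) st := by
  intro r0
  induction r0 with
  | nil => intro r1 st _; simp
  | cons a as ih =>
    intro r1 st h
    cases r1 with
    | nil => simp at h
    | cons b bs =>
      simp only [List.length_cons, List.range_succ_eq_map, List.foldl_cons, List.foldl_map,
        List.getD_cons_zero, List.getD_cons_succ, List.zip_cons_cons]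
      exact ih bs (body a b st) (by simpa using h)

-- full characterisation of A's loop state after folding over z
theorem pv_loop_char : ∀ (z : List (Char × Char)) (p m s : Int),
    z.foldl (fun st q => pvBodyA q.1 q.2 st) (p, m, s)
      = (p + pvDots z, m + pvAdj s (pvSeqOf z), (pvSeqOf z).getLastD s) := by
  intro z
  induction z with
  | nil => intro p m s; simp [pvDots, pvSeqOf, pvAdj]
  | cons q zs ih =>
    intro p m s
    obtain ⟨a, b⟩ := q
    rw [List.foldl_cons]
    by_cases h0 : a = '#'
    · subst h0
      have hstep : pvBodyA '#' b (p, m, s) = (p, (if s = 1 then m + 1 else m), 0) := by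
        simp [pvBodyA]
      have hseq : pvSeqOf (('#', b) :: zs) = 0 :: pvSeqOf zs := by simp [pvSeqOf]
      have hdots : pvDots (('#', b) :: zs) = pvDots zs := by simp [pvDots]
      rw [show pvBodyA ('#', b).1 ('#', b).2 (p, m, s) = pvBodyA '#' b (p, m, s) from rfl,
        hstep, ih, hseq, hdots]
      refine Prod.ext rfl (Prod.ext ?_ ?_)
      · show (if s = 1 then m + 1 else m) + pvAdj 0 (pvSeqOf zs)
          = m + pvAdj s ((0 : Int) :: pvSeqOf zs)
        simp only [pvAdj]
        split_ifs <;> simp_all <;> ring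
      · simp only [List.getLastD_cons]
    · by_cases h1 : b = '#'
      · subst h1
        have hstep : pvBodyA a '#' (p, m, s) = (p, (if s = 0 then m + 1 else m), 1) := by
          simp [pvBodyA, h0]
        have hseq : pvSeqOf ((a, '#') :: zs) = 1 :: pvSeqOf zs := by simp [pvSeqOf, h0]
        have hdots : pvDots ((a, '#') :: zs) = pvDots zs := by simp [pvDots]
        rw [show pvBodyA (a, '#').1 (a, '#').2 (p, m, s) = pvBodyA a '#' (p, m, s) from rfl,
          hstep, ih, hseq, hdots]
        refine Prod.ext rfl (Prod.ext ?_ ?_)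
        · show (if s = 0 then m + 1 else m) + pvAdj 1 (pvSeqOf zs)
            = m + pvAdj s ((1 : Int) :: pvSeqOf zs)
          simp only [pvAdj]
          split_ifs <;> simp_all <;> ring
        · simp only [List.getLastD_cons]
      · have hstep : pvBodyA a b (p, m, s)
            = ((if a = '.' ∧ b = '.' then p + 1 else p), m, s) := by
          simp [pvBodyA, h0, h1]
        have hseq : pvSeqOf ((a, b) :: zs) = pvSeqOf zs := by simp [pvSeqOf, h0, h1]
        have hdots : pvDots ((a, b) :: zs)
            = (if a = '.' ∧ b = '.' then 1 else 0) + pvDots zs := by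
          by_cases hd : a = '.' ∧ b = '.'
          · simp [pvDots, hd]
            ring
          · simp [pvDots, hd]
        rw [show pvBodyA (a, b).1 (a, b).2 (p, m, s) = pvBodyA a b (p, m, s) from rfl,
          hstep, ih, hseq, hdots]
        refine Prod.ext ?_ rfl
        show (if a = '.' ∧ b = '.' then p + 1 else p) + pvDots zs
          = p + ((if a = '.' ∧ b = '.' then 1 else 0) + pvDots zs)
        split_ifs <;> ring

-- every element of the obstacle sequence is 0 or 1
theorem pv_seq_mem (z : List (Char × Char)) : ∀ v ∈ pvSeqOf z, v = 0 ∨ v = 1 := by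
  intro v hv
  simp only [pvSeqOf, List.mem_filterMap] at hv
  obtain ⟨p, _, hp⟩ := hv
  split_ifs at hp <;> simp_all

-- A's seeded transition count equals the adjacent-difference count, over 0/1 sequences
theorem pv_adj_aux : ∀ (xs : List Int) (x : Int), (x = 0 ∨ x = 1) → (∀ v ∈ xs, v = 0 ∨ v = 1) →
    pvAdj x xs = pvTrans (x :: xs) := by
  intro xs
  induction xs with
  | nil => intro x _ _; simp [pvAdj, pvTrans]
  | cons y ys ih =>
    intro x hx hmem
    have hy : y = 0 ∨ y = 1 := hmem y (by simp)
    have hys : ∀ v ∈ ys, v = 0 ∨ v = 1 := fun v hv => hmem v (by simp [hv])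
    simp only [pvAdj, pvTrans, ih y hy hys]
    rcases hx with rfl | rfl <;> rcases hy with rfl | rfl <;> norm_num

theorem pv_adj_trans (l : List Int) (h : ∀ v ∈ l, v = 0 ∨ v = 1) :
    pvAdj (-1) l = pvTrans l := by
  cases l with
  | nil => simp [pvAdj, pvTrans]
  | cons x xs =>
    have hx : x = 0 ∨ x = 1 := h x (by simp)
    have hxs : ∀ v ∈ xs, v = 0 ∨ v = 1 := fun v hv => h v (by simp [hv])
    have : pvAdj (-1) (x :: xs) = 0 + pvAdj x xs := by
      simp only [pvAdj]
      rcases hx with rfl | rfl <;> norm_num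
    rw [this, pv_adj_aux xs x hx hxs]
    ring

-- pvTrans over an append: transitions of each part plus the boundary cross term
theorem pv_trans_append : ∀ (s t : List Int),
    pvTrans (s ++ t) = pvTrans s + pvTrans t + pvCross s.getLast? t.head? := by
  intro s
  induction s with
  | nil => intro t; simp [pvTrans, pvCross]
  | cons x s ih =>
    intro t
    cases s with
    | nil =>
      cases t with
      | nil => simp [pvTrans, pvCross]
      | cons y t' =>
        simp only [List.nil_append, List.cons_append, pvTrans, pvCross,
          List.getLast?_singleton, List.head?_cons]
        ring
    | cons y s' =>
      have hl : (x :: y :: s').getLast? = (y :: s').getLast? := by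
        simp [List.getLast?_cons_cons]
      calc pvTrans ((x :: y :: s') ++ t)
          = (if x = y then 0 else 1) + pvTrans ((y :: s') ++ t) := by
            simp only [List.cons_append, pvTrans]
        _ = (if x = y then 0 else 1) + (pvTrans (y :: s') + pvTrans t
              + pvCross (y :: s').getLast? t.head?) := by rw [ih]
        _ = pvTrans (x :: y :: s') + pvTrans t + pvCross (x :: y :: s').getLast? t.head? := by
            rw [hl]; simp only [pvTrans]; ring

theorem pv_dots_append (s t : List (Char × Char)) : pvDots (s ++ t) = pvDots s + pvDots t := by
  simp [pvDots, List.filter_append]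

theorem pv_seq_append (s t : List (Char × Char)) :
    pvSeqOf (s ++ t) = pvSeqOf s ++ pvSeqOf t := by
  simp [pvSeqOf, List.filterMap_append]

-- characterisation of B's divide-and-conquer summary
theorem pv_solve_char : ∀ (z : List (Char × Char)),
    pvSolve z = (pvDots z, pvTrans (pvSeqOf z), (pvSeqOf z).head?, (pvSeqOf z).getLast?) := by
  intro z
  induction z using pvSolve.induct with
  | case1 => simp [pvSolve, pvDots, pvSeqOf, pvTrans]
  | case2 a b =>
    by_cases h0 : a = '#' <;> by_cases h1 : b = '#' <;>
      by_cases hd : a = '.' ∧ b = '.' <;>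
      simp [pvSolve, pvDots, pvSeqOf, pvTrans, h0, h1, hd]
  | case3 c1 c2 rest _cols _mid ihL ihR =>
    rw [pvSolve, ihL, ihR]
    have hsplit := List.take_append_drop ((c1 :: c2 :: rest).length / 2) (c1 :: c2 :: rest)
    set cols := c1 :: c2 :: rest with hcols
    set L := cols.take (cols.length / 2) with hL
    set R := cols.drop (cols.length / 2) with hR
    have hdots : pvDots cols = pvDots L + pvDots R := by
      conv_lhs => rw [← hsplit]
      exact pv_dots_append L R
    have hseq : pvSeqOf cols = pvSeqOf L ++ pvSeqOf R := by
      conv_lhs => rw [← hsplit]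
      exact pv_seq_append L R
    refine Prod.ext ?_ (Prod.ext ?_ (Prod.ext ?_ ?_))
    · simp only [hdots]
    · simp only [hseq, pv_trans_append]
      show pvTrans (pvSeqOf L) + pvTrans (pvSeqOf R) +
          (match (pvSeqOf L).getLast?, (pvSeqOf R).head? with
            | some lL, some fR => if lL = fR then (0:Int) else 1
            | _, _ => 0)
        = pvTrans (pvSeqOf L) + pvTrans (pvSeqOf R)
            + pvCross (pvSeqOf L).getLast? (pvSeqOf R).head?
      cases (pvSeqOf L).getLast? <;> cases (pvSeqOf R).head? <;> simp [pvCross]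
    · simp only [hseq, List.head?_append]
    · simp only [hseq, List.getLast?_append]

-- ===== VERDICT (by name: the statement is the Claim_ definition above) =====
theorem calc_py_spec : Claim_equal_calc_py := by
  intro board _ hpre
  obtain ⟨_, hlen⟩ := hpre
  have hlen' : ((board.getD 0 "").toList).length ≤ ((board.getD 1 "").toList).length := by
    simpa using hlen
  unfold Spec_calc_py calc_py calc_py_alt
  simp only [pv_range_zip pvBodyA _ _ _ hlen', pv_loop_char, pv_solve_char,
    pv_adj_trans (pvSeqOf _) (pv_seq_mem _)]
  simp
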